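-- pv_equiv track=rewrite | github.com/weizeming0821/VQAP | traj_generator_segmentation/resume.py | build_progress_from_variation_stats
-- ===== SOURCE A (Python) =====
-- def build_progress_from_variation_stats(variation_stats):
--     progress = {
--         'planned_episodes': 0,
--         'done_episodes': 0,
--         'success_episodes': 0,
--         'failed_episodes': 0,
--         'demo_timeout_episodes': 0,
--         'watchdog_timeout_episodes': 0,
--         'exception_episodes': 0,
--         'phase_invalid_episodes': 0,
--         'aborted_episodes': 0,
--     }
--     for stats in variation_stats.values():
--         progress['planned_episodes'] += int(stats.get('planned_demos', 0))
--         progress['success_episodes'] += int(stats.get('success_demos', 0))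
--         progress['failed_episodes'] += int(stats.get('failed_demos', 0))
--         progress['demo_timeout_episodes'] += int(stats.get('demo_timeout_demos', 0))
--         progress['watchdog_timeout_episodes'] += int(stats.get('watchdog_timeout_demos', 0))
--         progress['exception_episodes'] += int(stats.get('exception_demos', 0))
--         progress['phase_invalid_episodes'] += int(stats.get('phase_invalid_demos', 0))
--         progress['aborted_episodes'] += int(stats.get('aborted_demos', 0))
--     progress['done_episodes'] = progress['success_episodes'] + progress['failed_episodes']
--     return progress
-- ===== SOURCE B (Python) =====
-- _FIELDS = [
--     ('planned_episodes', 'planned_demos'),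
--     ('done_episodes', None),
--     ('success_episodes', 'success_demos'),
--     ('failed_episodes', 'failed_demos'),
--     ('demo_timeout_episodes', 'demo_timeout_demos'),
--     ('watchdog_timeout_episodes', 'watchdog_timeout_demos'),
--     ('exception_episodes', 'exception_demos'),
--     ('phase_invalid_episodes', 'phase_invalid_demos'),
--     ('aborted_episodes', 'aborted_demos'),
-- ]
--
-- def build_progress_from_variation_stats(variation_stats):
--     records = list(variation_stats.values())
--     progress = {
--         out: (0 if src is None else sum(int(r.get(src, 0)) for r in records))
--         for out, src in _FIELDS
--     }
--     progress['done_episodes'] = progress['success_episodes'] + progress['failed_episodes']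
--     return progress
-- ===== Notes on version B (the rewrite author's own statement) =====
-- stated objective: simpler
-- what changed: Transposed the aggregation from record-major (one pass over records updating eight counters each) to field-major: a static output-key->source-key table and one sum over all records per output field, then done = success + failed.
import Mathlib
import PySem

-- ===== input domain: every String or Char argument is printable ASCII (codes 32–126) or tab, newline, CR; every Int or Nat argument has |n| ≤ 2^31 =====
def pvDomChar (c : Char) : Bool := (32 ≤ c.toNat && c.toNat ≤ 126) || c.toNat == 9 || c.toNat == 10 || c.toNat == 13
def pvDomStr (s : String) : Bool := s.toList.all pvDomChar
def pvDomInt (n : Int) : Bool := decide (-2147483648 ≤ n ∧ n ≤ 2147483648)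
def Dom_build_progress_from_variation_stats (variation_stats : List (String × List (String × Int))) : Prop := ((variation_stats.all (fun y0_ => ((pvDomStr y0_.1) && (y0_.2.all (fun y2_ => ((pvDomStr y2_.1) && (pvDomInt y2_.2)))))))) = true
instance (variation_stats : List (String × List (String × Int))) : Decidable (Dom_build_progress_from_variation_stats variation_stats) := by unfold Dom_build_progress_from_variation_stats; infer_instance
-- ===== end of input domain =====

-- B replaces A's record-major loop (eight in-place counter updates per record) by a
-- field-major pass: a static output-key -> source-key table and one sum over all records
-- per output field; objective: simpler.

-- ===== PORT A =====
-- the loop body of 'for stats in variation_stats.values(): progress[k] += int(stats.get(src, 0)) …'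
def pvStepA (d : PySem.Dict String Int) (stats : List (String × Int)) : PySem.Dict String Int :=
  let s := PySem.Dict.ofList stats
  let d := d.modify "planned_episodes" 0 (· + s.getD "planned_demos" 0)
  let d := d.modify "success_episodes" 0 (· + s.getD "success_demos" 0)
  let d := d.modify "failed_episodes" 0 (· + s.getD "failed_demos" 0)
  let d := d.modify "demo_timeout_episodes" 0 (· + s.getD "demo_timeout_demos" 0)
  let d := d.modify "watchdog_timeout_episodes" 0 (· + s.getD "watchdog_timeout_demos" 0)
  let d := d.modify "exception_episodes" 0 (· + s.getD "exception_demos" 0)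
  let d := d.modify "phase_invalid_episodes" 0 (· + s.getD "phase_invalid_demos" 0)
  d.modify "aborted_episodes" 0 (· + s.getD "aborted_demos" 0)

def build_progress_from_variation_stats (variation_stats : List (String × List (String × Int))) : List (String × Int) :=
  let progress : PySem.Dict String Int := PySem.Dict.ofList
    [("planned_episodes", 0), ("done_episodes", 0), ("success_episodes", 0),
     ("failed_episodes", 0), ("demo_timeout_episodes", 0), ("watchdog_timeout_episodes", 0),
     ("exception_episodes", 0), ("phase_invalid_episodes", 0), ("aborted_episodes", 0)]
  let progress := (PySem.Dict.ofList variation_stats).values.foldl pvStepA progress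
  let progress := progress.insert "done_episodes"
    (progress.getD "success_episodes" 0 + progress.getD "failed_episodes" 0)
  progress.items

-- ===== PORT B =====
-- static table: output key -> source stats key ('done_episodes' has no source)
def pvFields : List (String × Option String) :=
  [("planned_episodes", some "planned_demos"),
   ("done_episodes", none),
   ("success_episodes", some "success_demos"),
   ("failed_episodes", some "failed_demos"),
   ("demo_timeout_episodes", some "demo_timeout_demos"),
   ("watchdog_timeout_episodes", some "watchdog_timeout_demos"),
   ("exception_episodes", some "exception_demos"),
   ("phase_invalid_episodes", some "phase_invalid_demos"),
   ("aborted_episodes", some "aborted_demos")]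

def build_progress_from_variation_stats_alt (variation_stats : List (String × List (String × Int))) : List (String × Int) :=
  let records := (PySem.Dict.ofList variation_stats).values
  let progress : PySem.Dict String Int := pvFields.foldl (fun d p =>
    d.insert p.1 (match p.2 with
      | none => 0
      | some src => (records.map (fun r => (PySem.Dict.ofList r).getD src 0)).sum)) PySem.Dict.empty
  let progress := progress.insert "done_episodes"
    (progress.getD "success_episodes" 0 + progress.getD "failed_episodes" 0)
  progress.items

-- ===== PRECONDITION & SPEC =====
def Spec_build_progress_from_variation_stats (variation_stats : List (String × List (String × Int))) (out : List (String × Int)) : Prop := out = build_progress_from_variation_stats_alt variation_stats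
instance (variation_stats : List (String × List (String × Int))) (out : List (String × Int)) : Decidable (Spec_build_progress_from_variation_stats variation_stats out) := by unfold Spec_build_progress_from_variation_stats; infer_instance

-- ===== CLAIM (what is proved, stated in full; the proofs are below) =====
def Claim_equal_build_progress_from_variation_stats : Prop := ∀ (variation_stats : List (String × List (String × Int))), Dom_build_progress_from_variation_stats variation_stats → Spec_build_progress_from_variation_stats variation_stats (build_progress_from_variation_stats variation_stats)

-- ===== LEMMAS AND PROOFS =====

-- field-major total of one source key over all records
def pvTot (records : List (List (String × Int))) (src : String) : Int :=
  (records.map (fun r => (PySem.Dict.ofList r).getD src 0)).sum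

theorem pvLoopA (records : List (List (String × Int)))
    (v1 v2 v3 v4 v5 v6 v7 v8 v9 : Int) :
    records.foldl pvStepA (PySem.Dict.mk
      [("planned_episodes", v1), ("done_episodes", v2), ("success_episodes", v3),
       ("failed_episodes", v4), ("demo_timeout_episodes", v5), ("watchdog_timeout_episodes", v6),
       ("exception_episodes", v7), ("phase_invalid_episodes", v8), ("aborted_episodes", v9)])
    = PySem.Dict.mk
      [("planned_episodes", v1 + pvTot records "planned_demos"), ("done_episodes", v2),
       ("success_episodes", v3 + pvTot records "success_demos"),
       ("failed_episodes", v4 + pvTot records "failed_demos"),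
       ("demo_timeout_episodes", v5 + pvTot records "demo_timeout_demos"),
       ("watchdog_timeout_episodes", v6 + pvTot records "watchdog_timeout_demos"),
       ("exception_episodes", v7 + pvTot records "exception_demos"),
       ("phase_invalid_episodes", v8 + pvTot records "phase_invalid_demos"),
       ("aborted_episodes", v9 + pvTot records "aborted_demos")] := by
  induction records generalizing v1 v2 v3 v4 v5 v6 v7 v8 v9 with
  | nil => simp [pvTot]
  | cons r rest ih =>
    rw [List.foldl_cons]
    have hstep : pvStepA (PySem.Dict.mk
        [("planned_episodes", v1), ("done_episodes", v2), ("success_episodes", v3),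
         ("failed_episodes", v4), ("demo_timeout_episodes", v5), ("watchdog_timeout_episodes", v6),
         ("exception_episodes", v7), ("phase_invalid_episodes", v8), ("aborted_episodes", v9)]) r
      = PySem.Dict.mk
        [("planned_episodes", v1 + (PySem.Dict.ofList r).getD "planned_demos" 0), ("done_episodes", v2),
         ("success_episodes", v3 + (PySem.Dict.ofList r).getD "success_demos" 0),
         ("failed_episodes", v4 + (PySem.Dict.ofList r).getD "failed_demos" 0),
         ("demo_timeout_episodes", v5 + (PySem.Dict.ofList r).getD "demo_timeout_demos" 0),
         ("watchdog_timeout_episodes", v6 + (PySem.Dict.ofList r).getD "watchdog_timeout_demos" 0),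
         ("exception_episodes", v7 + (PySem.Dict.ofList r).getD "exception_demos" 0),
         ("phase_invalid_episodes", v8 + (PySem.Dict.ofList r).getD "phase_invalid_demos" 0),
         ("aborted_episodes", v9 + (PySem.Dict.ofList r).getD "aborted_demos" 0)] := by
      simp [pvStepA, PySem.Dict.modify, PySem.Dict.insert, PySem.Dict.getD,
        PySem.Dict.get?, PySem.Dict.contains]
    rw [hstep, ih]
    simp [pvTot, add_assoc]

theorem build_progress_eq (variation_stats : List (String × List (String × Int))) :
    build_progress_from_variation_stats variation_stats
    = build_progress_from_variation_stats_alt variation_stats := by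
  have hinit : (PySem.Dict.ofList
      [("planned_episodes", (0 : Int)), ("done_episodes", 0), ("success_episodes", 0),
       ("failed_episodes", 0), ("demo_timeout_episodes", 0), ("watchdog_timeout_episodes", 0),
       ("exception_episodes", 0), ("phase_invalid_episodes", 0), ("aborted_episodes", 0)])
    = PySem.Dict.mk
      [("planned_episodes", 0), ("done_episodes", 0), ("success_episodes", 0),
       ("failed_episodes", 0), ("demo_timeout_episodes", 0), ("watchdog_timeout_episodes", 0),
       ("exception_episodes", 0), ("phase_invalid_episodes", 0), ("aborted_episodes", 0)] := by decide
  simp only [build_progress_from_variation_stats, build_progress_from_variation_stats_alt]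
  rw [hinit, pvLoopA]
  simp [pvFields, pvTot, PySem.Dict.insert, PySem.Dict.getD, PySem.Dict.get?,
    PySem.Dict.empty, PySem.Dict.contains]

-- ===== VERDICT (by name: the statement is the Claim_ definition above) =====
theorem build_progress_from_variation_stats_spec : Claim_equal_build_progress_from_variation_stats := by
  intro vs _
  unfold Spec_build_progress_from_variation_stats
  exact build_progress_eq vs
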